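-- pv_equiv track=rewrite | github.com/tokheim/aoc | 2024/day_5.py | build_rule_lookup
-- ===== SOURCE A (Python) =====
-- def build_rule_lookup(lookup_lines):
--     rules = {}
--     for line in lookup_lines:
--         a, b = line.split("|")
--         if a not in rules:
--             rules[a] = []
--         rules[a].append(b)
--     return rules
-- ===== SOURCE B (Python) =====
-- def build_rule_lookup(lookup_lines):
--     pairs = [line.split("|") for line in lookup_lines]
--     keys = list(dict.fromkeys(a for a, b in pairs))
--     return {k: [b for a, b in pairs if a == k] for k in keys}
-- ===== Notes on version B (the rewrite author's own statement) =====
-- stated objective: alternative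
-- what changed: B splits all lines once into a pairs list, deduplicates the keys in first-appearance order, and builds each group by a per-key filter pass over the pairs, instead of A's incremental dict-insertion loop.
import Mathlib
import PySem

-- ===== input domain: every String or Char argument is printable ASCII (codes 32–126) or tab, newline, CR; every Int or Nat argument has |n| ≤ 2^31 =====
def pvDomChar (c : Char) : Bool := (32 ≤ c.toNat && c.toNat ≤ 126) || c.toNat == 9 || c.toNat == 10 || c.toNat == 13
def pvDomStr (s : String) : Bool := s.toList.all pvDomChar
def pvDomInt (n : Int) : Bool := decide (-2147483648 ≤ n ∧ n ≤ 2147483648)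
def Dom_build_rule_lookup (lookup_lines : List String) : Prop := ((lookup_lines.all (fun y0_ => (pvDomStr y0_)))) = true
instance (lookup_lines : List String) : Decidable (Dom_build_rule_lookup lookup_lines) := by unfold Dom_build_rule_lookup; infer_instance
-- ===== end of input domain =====

-- B replaces A's incremental dict-insertion loop by: split all lines into a pairs list,
-- dedup the keys in first-appearance order, and build each group by a per-key filter pass
-- (an alternative decomposition of the same grouping task; not claimed faster).


-- ===== PORT A =====
def build_rule_lookup (lookup_lines : List String) : List (String × List String) :=
  (lookup_lines.foldl (fun rules line =>
      match PySem.Str.split? line "|" with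
      | some [a, b] =>
        -- if a not in rules: rules[a] = []
        let rules := if rules.contains a = false then rules.insert a ([] : List String) else rules
        -- rules[a].append(b)
        rules.modify a [] (fun l => l ++ [b])
      | _ => rules   -- unpacking 'a, b = …' raises ValueError here; excluded by Pre_
    ) PySem.Dict.empty).items

-- ===== PORT B =====
def build_rule_lookup_alt (lookup_lines : List String) : List (String × List String) :=
  -- pairs = [line.split("|") for line in lookup_lines]
  let pairs := lookup_lines.map (fun line => (PySem.Str.split? line "|").getD [])
  -- keys = list(dict.fromkeys(a for a, b in pairs))   (unpacking 'a, b' = parts 0 and 1; Pre_ gives exactly two)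
  let keys := PySem.List.dedup (pairs.map (fun p => p.getD 0 ""))
  -- {k: [b for a, b in pairs if a == k] for k in keys}
  keys.map (fun k => (k, (pairs.filter (fun p => p.getD 0 "" == k)).map (fun p => p.getD 1 "")))

-- ===== PRECONDITION & SPEC =====
-- Pre_ excludes inputs on which A raises ValueError: a line that does not split on "|" into exactly two parts.
def Pre_build_rule_lookup (lookup_lines : List String) : Prop :=
  ∀ line ∈ lookup_lines, ((PySem.Str.split? line "|").getD []).length = 2
instance (lookup_lines : List String) : Decidable (Pre_build_rule_lookup lookup_lines) := by unfold Pre_build_rule_lookup; infer_instance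
def pvWitness_build_rule_lookup : List String := (["47|53", "97|13", "47|13"])

def Spec_build_rule_lookup (lookup_lines : List String) (out : List (String × List String)) : Prop := out = build_rule_lookup_alt lookup_lines
instance (lookup_lines : List String) (out : List (String × List String)) : Decidable (Spec_build_rule_lookup lookup_lines out) := by unfold Spec_build_rule_lookup; infer_instance

-- ===== CLAIM (what is proved, stated in full; the proofs are below) =====
def Claim_equal_build_rule_lookup : Prop := ∀ (lookup_lines : List String), Dom_build_rule_lookup lookup_lines → Pre_build_rule_lookup lookup_lines → Spec_build_rule_lookup lookup_lines (build_rule_lookup lookup_lines)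

-- ===== LEMMAS AND PROOFS =====

-- first ("a") and second ("b") part of a line's split, as A's and B's code read them
def pvKey (line : String) : String := ((PySem.Str.split? line "|").getD []).getD 0 ""
def pvVal (line : String) : String := ((PySem.Str.split? line "|").getD []).getD 1 ""

-- on a well-formed line, A's loop body is exactly a Dict.modify at the line's key
lemma step_eq (d : PySem.Dict String (List String)) (line : String)
    (h : ((PySem.Str.split? line "|").getD []).length = 2) :
    (match PySem.Str.split? line "|" with
      | some [a, b] =>
        (if d.contains a = false then d.insert a ([] : List String) else d).modify a [] (fun l => l ++ [b])
      | _ => d)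
    = d.modify (pvKey line) [] (fun l => l ++ [pvVal line]) := by
  unfold pvKey pvVal
  rcases hs : PySem.Str.split? line "|" with _ | p
  · simp [hs] at h
  · rcases p with _ | ⟨a, _ | ⟨b, _ | _⟩⟩ <;> simp [hs] at h ⊢
    by_cases hc : d.contains a
    · simp [hc]
    · simp only [hc]
      simp [PySem.Dict.modify, PySem.Dict.getD_insert_self, PySem.Dict.insert_insert_self,
        PySem.Dict.getD_of_not_contains d ([] : List String) (by simpa using hc)]

-- ===== VERDICT (by name: the statement is the Claim_ definition above) =====
theorem build_rule_lookup_spec : Claim_equal_build_rule_lookup := by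
  intro lookup_lines _ hpre
  show build_rule_lookup lookup_lines = build_rule_lookup_alt lookup_lines
  -- the pairs as (key, value) products
  set ps : List (String × String) := lookup_lines.map (fun l => (pvKey l, pvVal l)) with hps
  -- A's fold equals the plain modify-fold over ps
  have hfold : (lookup_lines.foldl (fun rules line =>
      match PySem.Str.split? line "|" with
      | some [a, b] =>
        (if rules.contains a = false then rules.insert a ([] : List String) else rules).modify a []
          (fun l => l ++ [b])
      | _ => rules) PySem.Dict.empty)
      = ps.foldl (fun d p => d.modify p.1 [] (fun v => v ++ [p.2])) PySem.Dict.empty := by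
    rw [hps, List.foldl_map]
    exact PySem.List.foldl_congr_mem _ _ _ _ (fun d line hmem => step_eq d line (hpre line hmem))
  set dA := ps.foldl (fun d p => d.modify p.1 [] (fun v => v ++ [p.2])) PySem.Dict.empty with hdA
  have hnd : dA.keys.Nodup := by
    rw [hdA]
    exact PySem.Dict.nodup_keys_foldl_modify_key ps Prod.fst []
      (fun _ p => fun v => v ++ [p.2]) PySem.Dict.empty (by simp)
  have hkeys : dA.keys = PySem.List.dedup (ps.map Prod.fst) := by
    rw [hdA, PySem.Dict.keys_foldl_modify_key ps Prod.fst [] (fun _ p => fun v => v ++ [p.2])]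
    simp [pysem, PySem.Set.ofList, PySem.Set.update, List.foldl_map]
  have hget : ∀ c, dA.getD c [] = (ps.filter (fun p => p.1 == c)).map (fun p => p.2) := by
    intro c
    rw [hdA, PySem.Dict.getD_foldl_modify_append ps PySem.Dict.empty c]
    simp
  unfold build_rule_lookup
  rw [hfold]
  show dA.items = build_rule_lookup_alt lookup_lines
  rw [PySem.Dict.items_eq_map_keys dA hnd [], hkeys]
  simp only [build_rule_lookup_alt]
  have hfst : ps.map Prod.fst
      = (lookup_lines.map (fun line => (PySem.Str.split? line "|").getD [])).map (fun p => p.getD 0 "") := by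
    simp [hps, List.map_map, Function.comp_def, pvKey]
  rw [← hfst]
  refine List.map_congr_left (fun k _ => ?_)
  rw [hget k]
  have hfil : (lookup_lines.map (fun line => (PySem.Str.split? line "|").getD [])).filter
        (fun p => p.getD 0 "" == k)
      = (lookup_lines.filter (fun line => pvKey line == k)).map
        (fun line => (PySem.Str.split? line "|").getD []) := by
    rw [List.filter_map]
    simp [Function.comp_def, pvKey]
  have hfil2 : ps.filter (fun p => p.1 == k)
      = (lookup_lines.filter (fun line => pvKey line == k)).map (fun l => (pvKey l, pvVal l)) := by
    rw [hps, List.filter_map]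
    simp [Function.comp_def]
  rw [hfil, hfil2]
  simp [List.map_map, Function.comp_def, pvVal]
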